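-- pv_equiv track=rewrite | github.com/lulesna/studia | Python/steganografia-i-znaki-wodne/stegano.py | metoda_1_wyodrebnianie
-- ===== SOURCE A (Python) =====
-- def usun_koncowe_zera(bity):
--     ostatnia_jedynka = bity.rfind('1')
--
--     if ostatnia_jedynka == -1:
--         # same zera
--         return ''
--
--     # zwraca bity do ostatniej jedynki włącznie
--     # zaokrągla w górę do pełnej grupy 4 bitów
--     koniec = ostatnia_jedynka + 1
--     if koniec % 4 != 0:
--         koniec = ((koniec // 4) + 1) * 4
--
--     return bity[:koniec]
--
-- def metoda_1_wyodrebnianie(znak_wodny):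
--     wiersze = znak_wodny.split('\n')
--     bity = ""
--
--     for wiersz in wiersze:
--         if len(wiersz) > 0 and wiersz[-1] == ' ':
--             bity += '1'
--         else:
--             bity += '0'
--
--     return usun_koncowe_zera(bity)
-- ===== SOURCE B (Python) =====
-- def _grupy(wiersze):
--     # emitted 4-bit groups; a group is dropped only if it is all zeros and
--     # nothing after it is emitted (so trailing zero groups vanish)
--     if not wiersze:
--         return []
--     grupa = ''.join('1' if w.endswith(' ') else '0' for w in wiersze[:4])
--     reszta = _grupy(wiersze[4:])
--     if reszta:
--         return [grupa] + reszta
--     return [grupa] if '1' in grupa else []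
--
-- def metoda_1_wyodrebnianie(znak_wodny):
--     return ''.join(_grupy(znak_wodny.split('\n')))
-- ===== Notes on version B (the rewrite author's own statement) =====
-- stated objective: alternative
-- what changed: B recurses over the lines four at a time, emitting one 4-bit group per step and dropping a group only when it is all zeros and the recursion on the rest emitted nothing; there is no full bit string, no rfind, no modular rounding and no slice.
import Mathlib
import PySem

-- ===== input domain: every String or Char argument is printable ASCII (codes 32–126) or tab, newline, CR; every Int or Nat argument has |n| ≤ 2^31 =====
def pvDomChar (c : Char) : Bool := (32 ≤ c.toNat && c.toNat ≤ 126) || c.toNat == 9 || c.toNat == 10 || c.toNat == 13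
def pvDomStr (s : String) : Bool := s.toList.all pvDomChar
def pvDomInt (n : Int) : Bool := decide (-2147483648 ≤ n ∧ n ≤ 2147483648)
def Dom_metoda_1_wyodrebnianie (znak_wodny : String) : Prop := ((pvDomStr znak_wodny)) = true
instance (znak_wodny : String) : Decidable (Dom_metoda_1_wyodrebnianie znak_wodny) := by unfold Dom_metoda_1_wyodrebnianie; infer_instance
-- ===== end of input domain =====

-- B recurses over the lines four at a time, emitting one 4-bit group per step and dropping a group only
-- when it is all zeros and the recursion on the remaining lines emitted nothing; no full bit string,
-- no rfind, no rounding arithmetic, no slice (objective: alternative).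

-- ===== PORT A =====
def pvUsunKoncoweZera (bity : String) : String :=
  let ostatnia_jedynka : Int := PySem.Str.rfind bity "1"
  if ostatnia_jedynka = -1 then ""
  else
    let koniec : Int := ostatnia_jedynka + 1
    let koniec : Int :=
      if PySem.Int.mod koniec 4 ≠ 0 then (PySem.Int.floordiv koniec 4 + 1) * 4 else koniec
    PySem.Str.slice bity none (some koniec)

def metoda_1_wyodrebnianie (znak_wodny : String) : String :=
  let wiersze := (PySem.Str.split? znak_wodny "\n").getD []   -- sep "\n" ≠ "", so split? is always some
  let bity := wiersze.foldl (fun bity wiersz =>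
    if 0 < PySem.Str.len wiersz ∧ PySem.Str.pyGet? wiersz (-1) = some ' '
    then bity ++ "1" else bity ++ "0") ""
  pvUsunKoncoweZera bity

-- ===== PORT B =====
-- _grupy from Source B: one 4-bit group per recursion step
def pvGrupy : List String → List String
  | [] => []
  | w :: rest =>
    let grupa := PySem.Str.join "" ((PySem.List.slice (w :: rest) none (some 4)).map
      (fun x => if PySem.Str.endswith x " " then "1" else "0"))
    let reszta := pvGrupy (PySem.List.slice (w :: rest) (some 4) none)
    if reszta ≠ [] then grupa :: reszta
    else if PySem.Str.isIn "1" grupa then [grupa] else []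
termination_by ws => ws.length
decreasing_by
  have h : PySem.List.slice (w :: rest) (some 4) none = (w :: rest).drop 4 := by
    rw [show (4 : Int) = ((4 : Nat) : Int) from rfl, PySem.List.slice_from_natCast]
  simp [h]

def metoda_1_wyodrebnianie_alt (znak_wodny : String) : String :=
  PySem.Str.join "" (pvGrupy ((PySem.Str.split? znak_wodny "\n").getD []))

-- ===== PRECONDITION & SPEC =====
def Spec_metoda_1_wyodrebnianie (znak_wodny : String) (out : String) : Prop := out = metoda_1_wyodrebnianie_alt znak_wodny
instance (znak_wodny : String) (out : String) : Decidable (Spec_metoda_1_wyodrebnianie znak_wodny out) := by unfold Spec_metoda_1_wyodrebnianie; infer_instance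

-- ===== CLAIM (what is proved, stated in full; the proofs are below) =====
def Claim_equal_metoda_1_wyodrebnianie : Prop := ∀ (znak_wodny : String), Dom_metoda_1_wyodrebnianie znak_wodny → Spec_metoda_1_wyodrebnianie znak_wodny (metoda_1_wyodrebnianie znak_wodny)

-- ===== LEMMAS AND PROOFS =====

-- the bit a line contributes, as a character
def pvBit (w : String) : Char := if PySem.Str.endswith w " " then '1' else '0'

-- the common value of both sides, over the bit list
def pvTarget (bs : List Char) : List Char :=
  match bs.reverse.findIdx? (· == '1') with
  | none => []
  | some i => bs.take (((bs.length - 1 - i) / 4 + 1) * 4)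

-- char-level mirror of pvGrupy
def cGrupy : List Char → List (List Char)
  | [] => []
  | c :: cs =>
    let g := (c :: cs).take 4
    let r := cGrupy ((c :: cs).drop 4)
    if r ≠ [] then g :: r else if '1' ∈ g then [g] else []
termination_by l => l.length
decreasing_by simp

theorem pv_condL (l : List Char) :
    (0 < ((l.length : Int)) ∧ PySem.List.pyGet? l (-1) = some ' ') ↔ List.isSuffixOf [' '] l = true := by
  induction l using List.reverseRecOn with
  | nil => simp [PySem.List.pyGet?, List.isSuffixOf]
  | append_singleton xs x ih =>
    rw [PySem.List.pyGet?_neg_one]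
    simp [List.isSuffixOf, List.reverse_append, List.isPrefixOf]
    exact eq_comm

theorem pv_cond_eq (w : String) :
    (0 < PySem.Str.len w ∧ PySem.Str.pyGet? w (-1) = some ' ') ↔ PySem.Str.endswith w " " = true := by
  have := pv_condL w.toList
  simpa [PySem.Str.len, PySem.Str.pyGet?, PySem.Str.endswith, PySem.Chars.pyGet?_eq_listPyGet?,
    PySem.Chars.endswith] using this

theorem pv_pfx (l : List Char) (c : Char) (hc : c ≠ '1') (j : Nat) (hj : j ≤ l.length) :
    List.isPrefixOf ['1'] (List.drop j (l ++ [c])) = List.isPrefixOf ['1'] (List.drop j l) := by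
  rcases Nat.lt_or_ge j l.length with h | h
  · rw [List.drop_append_of_le_length (by omega)]
    rcases hd : List.drop j l with _ | ⟨a, t⟩
    · have := List.length_drop (l := l) (i := j); simp [hd] at this; omega
    · simp [List.isPrefixOf]
  · have hj' : j = l.length := by omega
    subst hj'
    rw [List.drop_append_of_le_length (Nat.le_refl _)]
    simp [List.isPrefixOf]
    exact fun h => hc h.symm

theorem pv_go_append (l : List Char) (c : Char) (hc : c ≠ '1') :
    ∀ k, k ≤ l.length → PySem.Chars.rfind.go (l ++ [c]) ['1'] k = PySem.Chars.rfind.go l ['1'] k := by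
  intro k
  induction k with
  | zero =>
    intro _
    simp only [PySem.Chars.rfind.go]
    have h0 := pv_pfx l c hc 0 (by omega)
    simp only [List.drop_zero] at h0
    rw [h0]
  | succ j ih =>
    intro hk
    simp only [PySem.Chars.rfind.go]
    rw [pv_pfx l c hc (j+1) hk, ih (by omega)]

theorem pv_go_hit (s : List Char) (k : Nat) (h : List.isPrefixOf ['1'] (List.drop k s) = true) :
    PySem.Chars.rfind.go s ['1'] k = (k : Int) := by
  cases k with
  | zero =>
    rw [List.drop_zero] at h
    simp [PySem.Chars.rfind.go, h]
  | succ j =>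
    simp [PySem.Chars.rfind.go, h]

theorem pv_rfind_char (l : List Char) :
    PySem.Chars.rfind l ['1'] =
      match l.reverse.findIdx? (· == '1') with
      | none => -1
      | some i => ((l.length - 1 - i : Nat) : Int) := by
  induction l using List.reverseRecOn with
  | nil => simp [PySem.Chars.rfind, PySem.Chars.rfind.go, List.isPrefixOf]
  | append_singleton xs x ih =>
    rw [List.reverse_append]
    simp only [List.reverse_cons, List.reverse_nil, List.nil_append, List.singleton_append,
      List.findIdx?_cons]
    have hstep : ∀ (c : Char), PySem.Chars.rfind (xs ++ [c]) ['1'] =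
        PySem.Chars.rfind.go (xs ++ [c]) ['1'] xs.length := by
      intro c
      unfold PySem.Chars.rfind
      rw [List.length_append]
      simp only [List.length_cons, List.length_nil]
      simp only [PySem.Chars.rfind.go]
      rw [show List.drop (xs.length + 1) (xs ++ [c]) = [] from
        List.drop_eq_nil_of_le (by simp)]
      simp [List.isPrefixOf]
    have hdropL : List.drop xs.length (xs ++ [x]) = [x] := by
      simp [List.drop_append_of_le_length (Nat.le_refl _)]
    by_cases hx : x = '1'
    · subst hx
      simp only [beq_self_eq_true, if_true]
      rw [hstep '1', pv_go_hit _ _ (by rw [hdropL]; simp [List.isPrefixOf])]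
      simp
    · rw [if_neg (by simp [hx])]
      rw [hstep x, pv_go_append xs x hx xs.length (Nat.le_refl _)]
      rw [show PySem.Chars.rfind.go xs ['1'] xs.length = PySem.Chars.rfind xs ['1'] from rfl, ih]
      rcases hf : xs.reverse.findIdx? (· == '1') with _ | i
      · simp
      · have hi : i < xs.reverse.length := (List.findIdx?_eq_some_iff_findIdx_eq.mp hf).1
        simp only [List.length_reverse] at hi
        simp only [Option.map_some, List.length_append, List.length_cons, List.length_nil]
        congr 1
        omega

-- A's fold builds the map of pvBit
theorem pv_fold_eq (ws : List String) (acc : String) :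
    (ws.foldl (fun bity wiersz =>
      if 0 < PySem.Str.len wiersz ∧ PySem.Str.pyGet? wiersz (-1) = some ' '
      then bity ++ "1" else bity ++ "0") acc).toList = acc.toList ++ ws.map pvBit := by
  induction ws generalizing acc with
  | nil => simp
  | cons w ws ih =>
    simp only [List.foldl_cons, List.map_cons, ih]
    by_cases h : PySem.Chars.endswith w.toList [' '] = true
    · rw [if_pos ((pv_cond_eq w).mpr (by simpa [PySem.Str.endswith] using h))]
      simp [pvBit, PySem.Str.endswith, h]
    · rw [if_neg (fun hc => h (by simpa [PySem.Str.endswith] using (pv_cond_eq w).mp hc))]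
      simp [pvBit, PySem.Str.endswith, h]

-- the rounding arithmetic agrees
theorem pv_round_eq (m : Nat) :
    (if (m + 1) % 4 ≠ 0 then ((m + 1) / 4 + 1) * 4 else m + 1) = (m / 4 + 1) * 4 := by
  split_ifs with h <;> omega

-- A's whole computation, reduced to pvTarget on the bit list
theorem pv_A_char (ws : List String) :
    (pvUsunKoncoweZera (ws.foldl (fun bity wiersz =>
      if 0 < PySem.Str.len wiersz ∧ PySem.Str.pyGet? wiersz (-1) = some ' '
      then bity ++ "1" else bity ++ "0") "")).toList = pvTarget (ws.map pvBit) := by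
  obtain ⟨bity, hb, hbl⟩ : ∃ b, (ws.foldl (fun bity wiersz =>
      if 0 < PySem.Str.len wiersz ∧ PySem.Str.pyGet? wiersz (-1) = some ' '
      then bity ++ "1" else bity ++ "0") "") = b ∧ b.toList = ws.map pvBit :=
    ⟨_, rfl, by simpa using pv_fold_eq ws ""⟩
  rw [hb]
  unfold pvUsunKoncoweZera pvTarget
  have hrf : PySem.Str.rfind bity "1" = PySem.Chars.rfind (ws.map pvBit) ['1'] := by
    show PySem.Chars.rfind bity.toList "1".toList = _
    rw [hbl]; rfl
  rw [hrf, pv_rfind_char]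
  rcases hf : (ws.map pvBit).reverse.findIdx? (· == '1') with _ | i
  · simp
  · have hi : i < ws.length := by
      have := (List.findIdx?_eq_some_iff_findIdx_eq.mp hf).1
      simpa using this
    simp only [List.length_map]
    set m : Nat := ws.length - 1 - i with hm
    have hne : ((m : Int)) ≠ -1 := by exact fun hcon => by omega
    rw [if_neg hne]
    have hmod : PySem.Int.mod ((m : Int) + 1) 4 = (((m + 1) % 4 : Nat) : Int) := by
      rw [show ((m : Int) + 1) = ((m + 1 : Nat) : Int) by push_cast; ring]
      exact_mod_cast PySem.Int.mod_natCast (m + 1) 4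
    have hdiv : PySem.Int.floordiv ((m : Int) + 1) 4 = (((m + 1) / 4 : Nat) : Int) := by
      rw [show ((m : Int) + 1) = ((m + 1 : Nat) : Int) by push_cast; ring]
      exact_mod_cast PySem.Int.floordiv_natCast (m + 1) 4
    have hk : (if PySem.Int.mod ((m : Int) + 1) 4 ≠ 0
          then (PySem.Int.floordiv ((m : Int) + 1) 4 + 1) * 4 else ((m : Int) + 1))
        = (((m / 4 + 1) * 4 : Nat) : Int) := by
      rw [hmod, hdiv, ← pv_round_eq m]
      split_ifs with h1 h2 h2
      · push_cast; ring
      · exact absurd (by exact_mod_cast h1) h2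
      · exact absurd (by exact_mod_cast h2) h1
      · push_cast; ring
    rw [hk]
    rw [PySem.Str.toList_slice, PySem.Chars.slice_eq_listSlice, hbl,
      PySem.List.slice_to_natCast]

-- join with empty separator is flatten
theorem pv_join_nil_flatten (gs : List (List Char)) : PySem.Chars.join [] gs = gs.flatten := by
  induction gs with
  | nil => exact PySem.Chars.join_nil []
  | cons g gs ih =>
    cases gs with
    | nil => simpa using PySem.Chars.join_singleton ([] : List Char) g
    | cons h t =>
      rw [PySem.Chars.join_cons_cons, ih]
      simp

-- '1' in a string is membership of the character
theorem pv_isIn_one (g : List Char) : PySem.Chars.isIn ['1'] g = true ↔ '1' ∈ g := by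
  rw [PySem.Chars.isIn_iff_infix]
  constructor
  · exact fun h => h.mem (by simp)
  · intro h
    obtain ⟨s, t, rfl⟩ := List.append_of_mem h
    exact ⟨s, t, by simp⟩

-- one-step unfoldings of the two recursions
theorem cGrupy_cons (c : Char) (cs : List Char) :
    cGrupy (c :: cs) =
      if cGrupy ((c :: cs).drop 4) ≠ [] then (c :: cs).take 4 :: cGrupy ((c :: cs).drop 4)
      else if '1' ∈ (c :: cs).take 4 then [(c :: cs).take 4] else [] := by
  rw [cGrupy]

theorem pvGrupy_cons (w : String) (rest : List String) :
    pvGrupy (w :: rest) =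
      if pvGrupy (PySem.List.slice (w :: rest) (some 4) none) ≠ [] then
        PySem.Str.join "" ((PySem.List.slice (w :: rest) none (some 4)).map
          (fun x => if PySem.Str.endswith x " " then "1" else "0")) ::
          pvGrupy (PySem.List.slice (w :: rest) (some 4) none)
      else if PySem.Str.isIn "1" (PySem.Str.join "" ((PySem.List.slice (w :: rest) none (some 4)).map
          (fun x => if PySem.Str.endswith x " " then "1" else "0"))) then
        [PySem.Str.join "" ((PySem.List.slice (w :: rest) none (some 4)).map
          (fun x => if PySem.Str.endswith x " " then "1" else "0"))]
      else [] := by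
  rw [pvGrupy]

-- no '1' anywhere: nothing is emitted
theorem pv_cGrupy_no1 : ∀ n (bs : List Char), bs.length ≤ n → '1' ∉ bs → cGrupy bs = [] := by
  intro n
  induction n with
  | zero =>
    intro bs hb _
    have : bs = [] := List.eq_nil_of_length_eq_zero (by omega)
    simp [this, cGrupy]
  | succ n ih =>
    intro bs hb h1
    cases bs with
    | nil => simp [cGrupy]
    | cons c cs =>
      have hd : cGrupy ((c :: cs).drop 4) = [] := by
        refine ih _ (by simp at hb ⊢; omega) (fun hm => h1 (List.mem_of_mem_drop hm))
      have hg : '1' ∉ (c :: cs).take 4 := fun hm => h1 (List.mem_of_mem_take hm)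
      rw [cGrupy_cons, hd, if_neg (fun h => h rfl), if_neg hg]

-- the main emission lemma: if the last '1' sits at index j, the emitted groups
-- flatten to the first (j/4+1)*4 bits
theorem pv_cGrupy_flatten : ∀ n (bs : List Char) (j : Nat), bs.length ≤ n →
    bs[j]? = some '1' → (∀ k, j < k → bs[k]? ≠ some '1') →
    (cGrupy bs).flatten = bs.take ((j / 4 + 1) * 4) := by
  intro n
  induction n with
  | zero =>
    intro bs j hb hj _
    have : bs = [] := List.eq_nil_of_length_eq_zero (by omega)
    simp [this] at hj
  | succ n ih =>
    intro bs j hb hj hmax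
    have hjlen : j < bs.length := by
      by_contra h
      rw [List.getElem?_eq_none (by omega)] at hj
      simp at hj
    cases bs with
    | nil => simp at hjlen
    | cons c cs =>
      simp only [List.length_cons] at hb hjlen
      by_cases hd1 : '1' ∈ (c :: cs).drop 4
      · -- a '1' after the first group: j ≥ 4, recurse
        obtain ⟨k, hk, hke⟩ := List.getElem_of_mem hd1
        have hk' : (c :: cs)[4 + k]? = some '1' := by
          rw [← List.getElem?_drop]
          rw [List.getElem?_eq_getElem hk, hke]
        have hj4 : 4 ≤ j := by
          by_contra h
          exact hmax (4 + k) (by omega) hk'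
        have hdj : ((c :: cs).drop 4)[j - 4]? = some '1' := by
          rw [List.getElem?_drop, show 4 + (j - 4) = j by omega]
          exact hj
        have hdmax : ∀ k, j - 4 < k → ((c :: cs).drop 4)[k]? ≠ some '1' := by
          intro k hgt
          rw [List.getElem?_drop]
          exact hmax (4 + k) (by omega)
        have hrec : (cGrupy ((c :: cs).drop 4)).flatten =
            ((c :: cs).drop 4).take (((j - 4) / 4 + 1) * 4) :=
          ih _ _ (by simp; omega) hdj hdmax
        have hne : cGrupy ((c :: cs).drop 4) ≠ [] := by
          intro h0
          have h2 : ((((c :: cs).drop 4)).take (((j - 4) / 4 + 1) * 4)).length = 0 := by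
            rw [← hrec, h0]; rfl
          rw [List.length_take, List.length_drop, List.length_cons] at h2
          omega
        rw [cGrupy_cons, if_pos hne, List.flatten_cons, hrec]
        have harith : (j / 4 + 1) * 4 = 4 + ((j - 4) / 4 + 1) * 4 := by omega
        rw [harith, List.take_add]
      · -- no '1' after the first group: j < 4, emit just this group
        have hr : cGrupy ((c :: cs).drop 4) = [] :=
          pv_cGrupy_no1 _ _ (le_refl _) hd1
        have hj4 : j < 4 := by
          by_contra h
          apply hd1
          apply List.mem_of_getElem? (i := j - 4)
          rw [List.getElem?_drop, show 4 + (j - 4) = j by omega]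
          exact hj
        have hg1 : '1' ∈ (c :: cs).take 4 := by
          apply List.mem_of_getElem? (i := j)
          rw [List.getElem?_take_of_lt hj4]
          exact hj
        rw [cGrupy_cons, hr, if_neg (fun h => h rfl), if_pos hg1, List.flatten_cons]
        simp only [List.flatten_nil, List.append_nil]
        rw [show (j / 4 + 1) * 4 = 4 by omega]

-- cGrupy matches pvTarget
theorem pv_cGrupy_target (bs : List Char) : (cGrupy bs).flatten = pvTarget bs := by
  unfold pvTarget
  rcases hf : bs.reverse.findIdx? (· == '1') with _ | i
  · have h1 : '1' ∉ bs := by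
      intro hm
      have := List.findIdx?_eq_none_iff.mp hf
      have := this '1' (by simpa using hm)
      simp at this
    rw [pv_cGrupy_no1 bs.length bs (le_refl _) h1]
    rfl
  · obtain ⟨hi, hfi⟩ := List.findIdx?_eq_some_iff_findIdx_eq.mp hf
    rw [List.length_reverse] at hi
    have hp : ((bs.reverse)[i]'(by simpa using hi) == '1') = true ∧
        ∀ k (hk : k < i), ¬((bs.reverse)[k]'(by simp; omega) == '1') = true := by
      constructor
      · have := List.findIdx_getElem (w := by simpa [hfi] using hi) (xs := bs.reverse) (p := (· == '1'))
        simpa [hfi] using this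
      · intro k hk
        have := List.not_of_lt_findIdx (xs := bs.reverse) (p := (· == '1')) (by omega : k < List.findIdx (· == '1') bs.reverse)
        simpa using this
    have hrev : ∀ k, k < bs.length → bs.reverse[k]? = bs[bs.length - 1 - k]? := by
      intro k h
      rw [List.getElem?_eq_getElem (by simpa using h),
        List.getElem?_eq_getElem (by omega : bs.length - 1 - k < bs.length),
        List.getElem_reverse]
    have hjget : bs[bs.length - 1 - i]? = some '1' := by
      rw [← hrev i hi, List.getElem?_eq_getElem (by simpa using hi)]
      exact congrArg some (by simpa using hp.1)
    have hjmax : ∀ k, bs.length - 1 - i < k → bs[k]? ≠ some '1' := by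
      intro k hgt he
      have hklen : k < bs.length := by
        by_contra h
        rw [List.getElem?_eq_none (by omega)] at he
        simp at he
      have hkrev : bs.length - 1 - k < i := by omega
      have h2 := hp.2 (bs.length - 1 - k) hkrev
      apply h2
      have h3 : bs.reverse[bs.length - 1 - k]? = some '1' := by
        rw [hrev _ (by omega), show bs.length - 1 - (bs.length - 1 - k) = k from by omega]
        exact he
      rw [List.getElem?_eq_getElem (by simp; omega)] at h3
      simpa using Option.some.inj h3
    exact pv_cGrupy_flatten bs.length bs (bs.length - 1 - i) (le_refl _) hjget hjmax

-- B's pvGrupy mapped to char lists is cGrupy of the bit list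
theorem pv_pvGrupy_eq : ∀ n (ws : List String), ws.length ≤ n →
    (pvGrupy ws).map String.toList = cGrupy (ws.map pvBit) := by
  intro n
  induction n with
  | zero =>
    intro ws hw
    have : ws = [] := List.eq_nil_of_length_eq_zero (by omega)
    simp [this, pvGrupy, cGrupy]
  | succ n ih =>
    intro ws hw
    cases ws with
    | nil => simp [pvGrupy, cGrupy]
    | cons w rest =>
      have hslice_to : PySem.List.slice (w :: rest) none (some 4) = (w :: rest).take 4 := by
        rw [show (4 : Int) = ((4 : Nat) : Int) from rfl, PySem.List.slice_to_natCast]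
      have hslice_from : PySem.List.slice (w :: rest) (some 4) none = (w :: rest).drop 4 := by
        rw [show (4 : Int) = ((4 : Nat) : Int) from rfl, PySem.List.slice_from_natCast]
      have hgl : (PySem.Str.join "" (((w :: rest).take 4).map
          (fun x => if PySem.Str.endswith x " " then "1" else "0"))).toList =
          ((w :: rest).map pvBit).take 4 := by
        rw [PySem.Str.toList_join, List.map_map]
        have hcomp : (String.toList ∘ fun x => if PySem.Str.endswith x " " then "1" else "0")
            = (fun c => [c]) ∘ pvBit := by
          funext x
          simp only [Function.comp, pvBit]
          split_ifs <;> rfl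
        rw [hcomp, ← List.map_map, show ("" : String).toList = ([] : List Char) from rfl,
          PySem.Chars.join_nil_singletons, List.map_take]
      have hrec : (pvGrupy ((w :: rest).drop 4)).map String.toList =
          cGrupy (((w :: rest).map pvBit).drop 4) := by
        rw [← List.map_drop]
        exact ih _ (by simp at hw ⊢; omega)
      have hIn : PySem.Str.isIn "1" (PySem.Str.join "" (((w :: rest).take 4).map
          (fun x => if PySem.Str.endswith x " " then "1" else "0"))) = true ↔
          '1' ∈ ((w :: rest).map pvBit).take 4 := by
        rw [show PySem.Str.isIn "1" _ = PySem.Chars.isIn ['1'] _ from rfl, hgl]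
        exact pv_isIn_one _
      have hC := cGrupy_cons (pvBit w) (List.map pvBit rest)
      rw [show (pvBit w :: List.map pvBit rest) = List.map pvBit (w :: rest) from rfl] at hC
      rw [pvGrupy_cons, hslice_to, hslice_from, hC]
      by_cases hne : cGrupy (((w :: rest).map pvBit).drop 4) = []
      · have hne' : pvGrupy ((w :: rest).drop 4) = [] := by
          rw [hne] at hrec
          exact List.map_eq_nil_iff.mp hrec
        rw [hne', hne]
        rw [if_neg (fun (h : ([] : List String) ≠ []) => h rfl),
            if_neg (fun (h : ([] : List (List Char)) ≠ []) => h rfl)]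
        by_cases hone : '1' ∈ ((w :: rest).map pvBit).take 4
        · rw [if_pos (hIn.mpr hone), if_pos hone]
          simp only [List.map_cons, List.map_nil, hgl]
        · rw [if_neg (fun h => hone (hIn.mp h)), if_neg hone]
          rfl
      · have hne' : pvGrupy ((w :: rest).drop 4) ≠ [] := by
          intro h0
          apply hne
          rw [← hrec, h0]
          rfl
        rw [if_pos hne', if_pos hne]
        simp only [List.map_cons, hgl, hrec]

theorem pv_B_char (ws : List String) :
    (PySem.Str.join "" (pvGrupy ws)).toList = pvTarget (ws.map pvBit) := by
  rw [PySem.Str.toList_join, pv_pvGrupy_eq ws.length ws (le_refl _),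
    show ("" : String).toList = ([] : List Char) from rfl, pv_join_nil_flatten]
  exact pv_cGrupy_target _

-- ===== VERDICT (by name: the statement is the Claim_ definition above) =====
theorem metoda_1_wyodrebnianie_spec : Claim_equal_metoda_1_wyodrebnianie := by
  intro z _
  unfold Spec_metoda_1_wyodrebnianie metoda_1_wyodrebnianie metoda_1_wyodrebnianie_alt
  exact String.toList_inj.mp
    ((pv_A_char ((PySem.Str.split? z "\n").getD [])).trans
      (pv_B_char ((PySem.Str.split? z "\n").getD [])).symm)
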